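-- pv_equiv track=rewrite | github.com/Jeong-Seoha/algo-study | programmers/피로도/Jeong-Seoha.py | explore_dungeons
-- ===== SOURCE A (Python) =====
-- def explore_dungeons(k, dungeon_order):
--     # 주어진 던전 순서에서 최대 탐험 가능한 개수 계산
--     fatigue = k  # 현재 남은 피로도
--     count = 0  # 탐험한 던전 개수
--
--     for min_fatigue, consume_fatigue in dungeon_order:
--         if fatigue >= min_fatigue:  # 최소 필요 피로도를 만족하면 탐험 가능
--             fatigue -= consume_fatigue  # 피로도를 소모
--             count += 1  # 탐험한 던전 수 증가
--         else:
--             break  # 더 이상 탐험할 수 없으면 중단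
--     # 탐험한 던전 개수 반환
--     return count
-- ===== SOURCE B (Python) =====
-- def explore_dungeons(k, dungeon_order):
--     order = list(dungeon_order)
--     # prefix[i] = total fatigue consumed by the first i dungeons
--     prefix = [0]
--     for _, consume in order:
--         prefix.append(prefix[-1] + consume)
--     # count the prefix of dungeons whose min requirement is met by the remaining fatigue
--     count = 0
--     for i, (min_fatigue, _) in enumerate(order):
--         if k - prefix[i] < min_fatigue:
--             break
--         count += 1
--     return count
-- ===== Notes on version B (the rewrite author's own statement) =====
-- stated objective: alternative
-- what changed: Replaces the running fatigue accumulator with a precomputed prefix-consumption table followed by a counting scan of the prefix whose remaining fatigue meets each dungeon's minimum.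
import Mathlib
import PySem

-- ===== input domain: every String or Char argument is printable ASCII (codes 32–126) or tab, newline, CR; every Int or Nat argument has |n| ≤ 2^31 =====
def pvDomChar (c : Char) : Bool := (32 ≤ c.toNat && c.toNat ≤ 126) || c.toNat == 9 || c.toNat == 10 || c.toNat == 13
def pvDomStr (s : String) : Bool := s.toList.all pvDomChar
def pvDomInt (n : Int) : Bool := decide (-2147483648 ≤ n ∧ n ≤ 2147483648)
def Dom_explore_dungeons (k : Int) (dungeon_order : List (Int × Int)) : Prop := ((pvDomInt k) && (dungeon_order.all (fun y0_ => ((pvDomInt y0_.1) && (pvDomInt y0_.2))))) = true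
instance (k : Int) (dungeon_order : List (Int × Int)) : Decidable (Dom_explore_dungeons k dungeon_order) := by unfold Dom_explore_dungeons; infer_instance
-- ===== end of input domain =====

-- B builds a prefix-consumed table first and counts the valid prefix, instead of A's running fatigue-and-break loop (alternative decomposition, same cost).


-- ===== PORT A =====
-- A: running fatigue accumulator with early break
def pvLoopA (fatigue count : Int) : List (Int × Int) → Int
  | [] => count
  | (m, c) :: rest => if fatigue ≥ m then pvLoopA (fatigue - c) (count + 1) rest else count

def explore_dungeons (k : Int) (dungeon_order : List (Int × Int)) : Int :=
  pvLoopA k 0 dungeon_order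

-- ===== PORT B =====
-- B: prefix-consumption table (Source B's append loop), then a counting scan over it
def pvPrefix (s : Int) : List (Int × Int) → List Int
  | [] => [s]
  | (_, c) :: rest => s :: pvPrefix (s + c) rest

def pvCountB (k : Int) : List Int → List (Int × Int) → Int
  | p :: ps, (m, _) :: rest => if k - p < m then 0 else 1 + pvCountB k ps rest
  | _, _ => 0

def explore_dungeons_alt (k : Int) (dungeon_order : List (Int × Int)) : Int :=
  pvCountB k (pvPrefix 0 dungeon_order) dungeon_order

-- ===== PRECONDITION & SPEC =====
def Spec_explore_dungeons (k : Int) (dungeon_order : List (Int × Int)) (out : Int) : Prop := out = explore_dungeons_alt k dungeon_order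
instance (k : Int) (dungeon_order : List (Int × Int)) (out : Int) : Decidable (Spec_explore_dungeons k dungeon_order out) := by unfold Spec_explore_dungeons; infer_instance

-- ===== CLAIM (what is proved, stated in full; the proofs are below) =====
def Claim_equal_explore_dungeons : Prop := ∀ (k : Int) (dungeon_order : List (Int × Int)), Dom_explore_dungeons k dungeon_order → Spec_explore_dungeons k dungeon_order (explore_dungeons k dungeon_order)

-- ===== LEMMAS AND PROOFS =====

-- ===== VERDICT (by name: the statement is the Claim_ definition above) =====
theorem pv_loop_eq (l : List (Int × Int)) : ∀ (k s count : Int),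
    pvLoopA (k - s) count l = count + pvCountB k (pvPrefix s l) l := by
  induction l with
  | nil => intro k s count; simp [pvLoopA, pvPrefix, pvCountB]
  | cons h rest ih =>
    intro k s count
    obtain ⟨m, c⟩ := h
    simp only [pvLoopA, pvPrefix, pvCountB]
    by_cases hge : k - s ≥ m
    · rw [if_pos hge, if_neg (by omega)]
      have := ih k (s + c) (count + 1)
      have e : k - s - c = k - (s + c) := by ring
      rw [e, this]; ring
    · rw [if_neg hge, if_pos (by omega)]; ring

theorem explore_dungeons_spec : Claim_equal_explore_dungeons := by
  intro k l _
  unfold Spec_explore_dungeons explore_dungeons explore_dungeons_alt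
  have := pv_loop_eq l k 0 0
  simpa using this
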